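-- pv_equiv track=rewrite | github.com/RakshitRabugotra/Leaf-Music.Player | v0.3/Using-Listbox.py | get_str_attributes
-- ===== SOURCE A (Python) =====
-- def get_str_attributes(string, target='name') -> str:
--     ret = ''
--     dir_ = list()
--     for i in string[::-1]:
--         if i != '/':
--             ret += i
--         else:
--             dir_.append(ret[::-1])
--             ret = ''
--     dir_.append(ret[::-1])
--     ret = dir_.pop(0)
--     main_dir = "/".join(reversed(dir_))
--
--     if target == 'name':
--         return ret
--     else:
--         return main_dir
-- ===== SOURCE B (Python) =====
-- def get_str_attributes(string, target='name') -> str: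
--     parts = string.split('/')
--     if target == 'name':
--         return parts[-1]
--     return '/'.join(parts[:-1])
-- ===== Notes on version B (the rewrite author's own statement) =====
-- stated objective: idiomatic
-- what changed: Replaces the reversed character-by-character scan with its ret accumulator and dir_ list by one str.split on the separator plus last-element indexing / join of all but the last part.
import Mathlib
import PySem

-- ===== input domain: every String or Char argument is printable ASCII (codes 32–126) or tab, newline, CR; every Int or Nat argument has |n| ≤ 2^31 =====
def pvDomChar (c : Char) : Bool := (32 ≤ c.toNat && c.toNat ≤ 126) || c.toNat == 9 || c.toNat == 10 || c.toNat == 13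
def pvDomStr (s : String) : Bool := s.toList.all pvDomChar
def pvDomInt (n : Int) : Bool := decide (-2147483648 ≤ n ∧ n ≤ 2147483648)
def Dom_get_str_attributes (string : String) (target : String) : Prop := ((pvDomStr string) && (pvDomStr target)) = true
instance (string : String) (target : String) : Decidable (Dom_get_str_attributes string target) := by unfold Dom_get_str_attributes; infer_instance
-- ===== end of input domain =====

-- B replaces A's reversed char-by-char scan (ret accumulator + dir_ list) by one split('/')
-- plus last-element / join-of-all-but-last; objective: idiomatic. No argument is mutated.

-- ===== PORT A =====
-- string[::-1] and ret[::-1] are full slices with step -1, i.e. exact list reversal (.reverse).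
def get_str_attributes (string : String) (target : String) : String :=
  -- the for-loop over string[::-1] with state (ret, dir_)
  let st : List Char × List (List Char) :=
    string.toList.reverse.foldl
      (fun (st : List Char × List (List Char)) i =>
        if i ≠ '/' then (st.1 ++ [i], st.2)
        else ([], st.2 ++ [st.1.reverse]))
      ([], [])
  let dir₀ : List (List Char) := st.2 ++ [st.1.reverse]
  match PySem.List.pop? dir₀ 0 with     -- dir_.pop(0); dir₀ is never empty, so this never fails
  | none => ""
  | some (ret, dir₁) =>
    let main_dir : List Char := PySem.Chars.join ['/'] dir₁.reverse   -- "/".join(reversed(dir_))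
    if target == "name" then String.ofList ret else String.ofList main_dir

-- ===== PORT B =====
def get_str_attributes_alt (string : String) (target : String) : String :=
  let parts : List (List Char) := PySem.Chars.splitOn string.toList ['/']   -- string.split('/'); sep ≠ ''
  if target == "name" then
    String.ofList ((PySem.List.pyGet? parts (-1)).getD [])   -- parts[-1]; parts is never empty
  else
    String.ofList (PySem.Chars.join ['/'] (PySem.List.slice parts none (some (-1))))   -- '/'.join(parts[:-1])

-- ===== PRECONDITION & SPEC =====
def Spec_get_str_attributes (string : String) (target : String) (out : String) : Prop := out = get_str_attributes_alt string target
instance (string : String) (target : String) (out : String) : Decidable (Spec_get_str_attributes string target out) := by unfold Spec_get_str_attributes; infer_instance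

-- ===== CLAIM (what is proved, stated in full; the proofs are below) =====
def Claim_equal_get_str_attributes : Prop := ∀ (string : String) (target : String), Dom_get_str_attributes string target → Spec_get_str_attributes string target (get_str_attributes string target)

-- ===== LEMMAS AND PROOFS =====

-- Structural form of Python's split on the single separator character '/':
def pvSplit : List Char → List (List Char)
  | [] => [[]]
  | c :: cs => if c = '/' then [] :: pvSplit cs
               else (c :: (pvSplit cs).headI) :: (pvSplit cs).tail

theorem pvSplit_ne_nil (cs : List Char) : pvSplit cs ≠ [] := by
  cases cs with
  | nil => simp [pvSplit]
  | cons c cs => by_cases h : c = '/' <;> simp [pvSplit, h]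

theorem splitOn_go_eq (l : List Char) : ∀ (fuel : Nat) (cur : List Char) (acc : List (List Char)),
    l.length < fuel →
    PySem.Chars.splitOn.go ['/'] fuel l cur acc
      = acc.reverse ++ (pvSplit l).modifyHead (cur.reverse ++ ·) := by
  induction l with
  | nil =>
    intro fuel cur acc h
    cases fuel with
    | zero => omega
    | succ f => simp [PySem.Chars.splitOn.go, pvSplit]
  | cons c cs ih =>
    intro fuel cur acc h
    cases fuel with
    | zero => omega
    | succ f =>
      by_cases hc : c = '/'
      · subst hc
        rw [PySem.Chars.splitOn.go, if_pos (by simp)]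
        simp only [List.length_cons, List.length_nil, List.drop_succ_cons, List.drop_zero]
        rw [ih f [] (cur.reverse :: acc) (by simpa using h)]
        obtain ⟨p, ps, hp⟩ := List.exists_cons_of_ne_nil (pvSplit_ne_nil cs)
        simp [pvSplit, hp]
      · rw [PySem.Chars.splitOn.go]
        have hpre : (['/'].isPrefixOf (c :: cs)) = false := by
          simp [List.isPrefixOf]
          exact fun h => hc h.symm
        rw [hpre]
        simp only [Bool.false_eq_true, if_false]
        rw [ih f (c :: cur) acc (by simpa using h)]
        obtain ⟨p, ps, hp⟩ := List.exists_cons_of_ne_nil (pvSplit_ne_nil cs)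
        simp [pvSplit, hc, hp]

theorem splitOn_eq_pvSplit (cs : List Char) : PySem.Chars.splitOn cs ['/'] = pvSplit cs := by
  rw [PySem.Chars.splitOn, splitOn_go_eq cs (cs.length + 1) [] [] (by omega)]
  obtain ⟨p, ps, hp⟩ := List.exists_cons_of_ne_nil (pvSplit_ne_nil cs)
  simp [hp]

-- A's loop invariant: after scanning cs in reverse, ret is the reversed first segment of cs
-- and dir_ holds the remaining segments in reverse order.
theorem loopA_eq (cs : List Char) :
    cs.reverse.foldl
      (fun (st : List Char × List (List Char)) i =>
        if i ≠ '/' then (st.1 ++ [i], st.2)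
        else ([], st.2 ++ [st.1.reverse]))
      ([], [])
    = ((pvSplit cs).headI.reverse, (pvSplit cs).tail.reverse) := by
  induction cs with
  | nil => simp [pvSplit]
  | cons c cs ih =>
    rw [List.reverse_cons, List.foldl_append, ih]
    by_cases hc : c = '/'
    · subst hc
      obtain ⟨p, ps, hp⟩ := List.exists_cons_of_ne_nil (pvSplit_ne_nil cs)
      simp [pvSplit, hp]
    · obtain ⟨p, ps, hp⟩ := List.exists_cons_of_ne_nil (pvSplit_ne_nil cs)
      simp [pvSplit, hc, hp]

theorem pop_zero {α : Type} (x : α) (l : List α) : PySem.List.pop? (x :: l) 0 = some (x, l) := by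
  simp [pysem]

theorem pyGet_concat_neg_one {α : Type} (l : List α) (x : α) :
    PySem.List.pyGet? (l ++ [x]) (-1) = some x := by
  simp [pysem]

theorem slice_concat_to_neg_one {α : Type} (l : List α) (x : α) :
    PySem.List.slice (l ++ [x]) none (some (-1)) = l := by
  simp [pysem]

-- ===== VERDICT (by name: the statement is the Claim_ definition above) =====
theorem get_str_attributes_spec : Claim_equal_get_str_attributes := by
  intro string target _
  unfold Spec_get_str_attributes get_str_attributes get_str_attributes_alt
  rw [splitOn_eq_pvSplit, loopA_eq]
  obtain ⟨p, ps, hp⟩ := List.exists_cons_of_ne_nil (pvSplit_ne_nil string.toList)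
  rw [hp]
  simp only [List.headI, List.tail, List.reverse_reverse]
  cases hr : ps.reverse with
  | nil =>
    have hps : ps = [] := List.reverse_eq_nil_iff.mp hr
    subst hps
    simp only [List.nil_append]
    rw [pop_zero]
    by_cases ht : target == "name"
    · dsimp only
      rw [if_pos ht, if_pos ht, show ([p] : List (List Char)) = [] ++ [p] from rfl, pyGet_concat_neg_one]
      rfl
    · dsimp only
      rw [if_neg ht, if_neg ht,
          show ([p] : List (List Char)) = [] ++ [p] from rfl, slice_concat_to_neg_one]
      rfl
  | cons q qs =>
    have hps : ps = qs.reverse ++ [q] := by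
      rw [← List.reverse_reverse ps, hr]; simp
    subst hps
    simp only [List.cons_append]
    rw [pop_zero]
    by_cases ht : target == "name"
    · dsimp only
      rw [if_pos ht, if_pos ht, ← List.cons_append, pyGet_concat_neg_one]
      rfl
    · dsimp only
      rw [if_neg ht, if_neg ht, ← List.cons_append, slice_concat_to_neg_one]
      simp
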